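-- pv_equiv track=rewrite | github.com/omaratta2001/SecurityProject | AES.py | plaintext_to_binary1
-- ===== SOURCE A (Python) =====
-- def plaintext_to_binary1(plaintext):
--     binary_blocks = []
--     for i in range(0, len(plaintext), 2):
--         if i+1 < len(plaintext):
--             # If there are two characters left in plaintext
--             binary_block = format(ord(plaintext[i]), '08b') + format(ord(plaintext[i+1]), '08b')
--         else:
--             # If there is only one character left in plaintext
--             binary_block = format(ord(plaintext[i]), '08b') + '00000000'
--         binary_blocks.append(binary_block)
--     return binary_blocks
-- ===== SOURCE B (Python) =====
-- def plaintext_to_binary1(plaintext):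
--     # Encode every character to its 8-bit code first, pad the code list once if
--     # its length is odd, then glue the codes together two at a time.
--     codes = [format(ord(c), '08b') for c in plaintext]
--     if len(codes) % 2 == 1:
--         codes.append('00000000')
--     it = iter(codes)
--     return [a + b for a, b in zip(it, it)]
-- ===== Notes on version B (the rewrite author's own statement) =====
-- stated objective: alternative
-- what changed: B first maps every character to its 8-bit code, pads the code list once when its length is odd, and then pairs consecutive codes with zip, instead of A's single index loop over range(0,len,2) with a per-iteration odd/even branch and direct string indexing.
import Mathlib
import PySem

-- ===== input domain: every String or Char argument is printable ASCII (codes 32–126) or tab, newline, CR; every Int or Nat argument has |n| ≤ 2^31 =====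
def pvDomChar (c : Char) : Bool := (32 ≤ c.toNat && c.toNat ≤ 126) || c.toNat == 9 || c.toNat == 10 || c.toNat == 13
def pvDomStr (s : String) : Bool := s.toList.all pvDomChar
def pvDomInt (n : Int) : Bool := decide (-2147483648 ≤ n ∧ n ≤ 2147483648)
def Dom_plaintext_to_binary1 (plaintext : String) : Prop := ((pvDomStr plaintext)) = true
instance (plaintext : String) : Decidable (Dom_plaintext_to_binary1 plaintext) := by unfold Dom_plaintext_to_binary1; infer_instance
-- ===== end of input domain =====

-- B separates per-character 8-bit encoding from pairing (encode all characters, pad the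
-- code list once if its length is odd, then join consecutive codes two at a time),
-- replacing A's index loop over range(0, len, 2) with its per-iteration odd/even branch.

-- ===== PORT A =====
-- format(ord(c), '08b')
def pvA_fmt8 (c : Char) : List Char :=
  PySem.Chars.zfill (PySem.Int.toBinChars (c.toNat : Int)) 8

-- the body of A's loop: the block appended for index i
def pvA_block (cs : List Char) (i : Int) : String :=
  if i + 1 < (cs.length : Int) then
    String.ofList (pvA_fmt8 (PySem.List.pyGetD cs i ' ') ++ pvA_fmt8 (PySem.List.pyGetD cs (i + 1) ' '))
  else
    String.ofList (pvA_fmt8 (PySem.List.pyGetD cs i ' ') ++ ['0','0','0','0','0','0','0','0'])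

def plaintext_to_binary1 (plaintext : String) : List String :=
  (PySem.List.pyRange 0 (plaintext.toList.length : Int) 2).foldl
    (fun blocks i => blocks ++ [pvA_block plaintext.toList i]) []

-- ===== PORT B =====
-- format(ord(c), '08b')
def pvB_encode8 (c : Char) : List Char :=
  PySem.Chars.zfill (PySem.Int.toBinChars (c.toNat : Int)) 8

-- [a + b for a, b in zip(it, it)]
def pvB_pairUp : List (List Char) → List String
  | a :: b :: rest => String.ofList (a ++ b) :: pvB_pairUp rest
  | _ => []

def plaintext_to_binary1_alt (plaintext : String) : List String :=
  let codes := plaintext.toList.map pvB_encode8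
  let padded := if codes.length % 2 == 1 then codes ++ [['0','0','0','0','0','0','0','0']] else codes
  pvB_pairUp padded

-- ===== PRECONDITION & SPEC =====
def Spec_plaintext_to_binary1 (plaintext : String) (out : List String) : Prop := out = plaintext_to_binary1_alt plaintext
instance (plaintext : String) (out : List String) : Decidable (Spec_plaintext_to_binary1 plaintext out) := by unfold Spec_plaintext_to_binary1; infer_instance

-- ===== CLAIM (what is proved, stated in full; the proofs are below) =====
def Claim_equal_plaintext_to_binary1 : Prop := ∀ (plaintext : String), Dom_plaintext_to_binary1 plaintext → Spec_plaintext_to_binary1 plaintext (plaintext_to_binary1 plaintext)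

-- ===== LEMMAS AND PROOFS =====

-- range(0, n+2, 2) = 0 :: [i + 2 for i in range(0, n, 2)]
theorem pv_range2_cons (n : Nat) :
    PySem.List.pyRange 0 ((n : Int) + 2) 2 =
      0 :: (PySem.List.pyRange 0 (n : Int) 2).map (· + 2) := by
  rw [PySem.List.pyRange_of_pos 0 ((n : Int) + 2) (by omega),
      PySem.List.pyRange_of_pos 0 (n : Int) (by omega)]
  have h1 : (if (0 : Int) < (n : Int) + 2 then ((((n : Int) + 2) - 0 + 2 - 1) / 2).toNat else 0)
      = (n + 1) / 2 + 1 := by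
    rw [if_pos (by omega)]
    omega
  have h2 : (if (0 : Int) < (n : Int) then (((n : Int) - 0 + 2 - 1) / 2).toNat else 0)
      = (n + 1) / 2 := by
    split <;> omega
  rw [h1, h2, List.range_succ_eq_map, List.map_cons]
  refine List.cons_eq_cons.mpr ⟨by norm_num, ?_⟩
  rw [List.map_map, List.map_map]
  apply List.map_congr_left
  intro k _
  simp
  ring

-- xs[i + 2] read two characters down a cons-cons list
theorem pv_getD_cons_cons {α : Type} (a b : α) (xs : List α) (m : Nat) (d : α) :
    PySem.List.pyGetD (a :: b :: xs) ((m : Int) + 2) d = PySem.List.pyGetD xs (m : Int) d := by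
  have e : ((m : Int) + 2) = ((m + 2 : Nat) : Int) := by push_cast; ring
  rw [e, PySem.List.pyGetD_natCast, PySem.List.pyGetD_natCast]
  simp [List.getD]

-- shifting A's loop body two characters down the string
theorem pv_block_shift (c1 c2 : Char) (rest : List Char) (k : Nat) :
    pvA_block (c1 :: c2 :: rest) ((k : Int) + 2) = pvA_block rest (k : Int) := by
  unfold pvA_block
  have e2 : ((k : Int) + 2 + 1) = (((k + 1 : Nat) : Int)) + 2 := by push_cast; ring
  rw [e2, pv_getD_cons_cons c1 c2 rest (k + 1) ' ', pv_getD_cons_cons c1 c2 rest k ' ']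
  simp only [List.length_cons]
  push_cast
  split_ifs with h1 h2 <;> first | rfl | (exfalso; omega)

-- the core equivalence, two characters at a time
theorem pv_main : ∀ cs : List Char,
    (PySem.List.pyRange 0 (cs.length : Int) 2).map (pvA_block cs) =
      pvB_pairUp (if (cs.map pvB_encode8).length % 2 == 1
        then cs.map pvB_encode8 ++ [['0','0','0','0','0','0','0','0']]
        else cs.map pvB_encode8)
  | [] => by simp [PySem.List.pyRange, pvB_pairUp]
  | [c] => by
      have hr : PySem.List.pyRange 0 ((1 : Int)) 2 = [0] := by decide
      simp only [List.length_cons, List.length_nil, Nat.cast_one, Nat.zero_add]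
      norm_num [hr]
      simp [pvA_block, pvB_pairUp, pvA_fmt8, pvB_encode8, PySem.List.pyGetD_zero_cons]
  | c1 :: c2 :: rest => by
      have hlen : (((c1 :: c2 :: rest : List Char)).length : Int) = (rest.length : Int) + 2 := by
        simp
        ring
      rw [hlen, pv_range2_cons, List.map_cons, List.map_map]
      have hshift : (PySem.List.pyRange 0 (rest.length : Int) 2).map (pvA_block (c1 :: c2 :: rest) ∘ (· + 2))
          = (PySem.List.pyRange 0 (rest.length : Int) 2).map (pvA_block rest) := by
        apply List.map_congr_left
        intro i hi
        have h0 : 0 ≤ i := by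
          have := (PySem.List.mem_pyRange_iff_of_pos (by omega : (0:Int) < 2) i).mp hi
          omega
        obtain ⟨k, rfl⟩ := Int.eq_ofNat_of_zero_le h0
        exact pv_block_shift c1 c2 rest k
      rw [hshift, pv_main rest]
      have hpar : ((pvB_encode8 c1 :: pvB_encode8 c2 :: rest.map pvB_encode8).length % 2 == 1)
          = (((rest.map pvB_encode8).length % 2 == 1)) := by
        simp
        omega
      rw [List.map_cons, List.map_cons, hpar]
      have hblock : pvA_block (c1 :: c2 :: rest) 0
          = String.ofList (pvB_encode8 c1 ++ pvB_encode8 c2) := by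
        unfold pvA_block
        rw [if_pos (by simp)]
        rw [PySem.List.pyGetD_zero_cons, show ((0:Int) + 1) = (1:Int) by norm_num,
            PySem.List.pyGetD_ofNat' (c1 :: c2 :: rest) 1 ' ']
        simp [pvA_fmt8, pvB_encode8, List.getD]
      split <;> simp [pvB_pairUp, hblock]

-- ===== VERDICT (by name: the statement is the Claim_ definition above) =====
theorem plaintext_to_binary1_spec : Claim_equal_plaintext_to_binary1 := by
  intro plaintext _
  unfold Spec_plaintext_to_binary1 plaintext_to_binary1 plaintext_to_binary1_alt
  rw [PySem.List.foldl_append_singleton_eq_map, List.nil_append]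
  exact pv_main plaintext.toList
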